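-- pv_equiv track=rewrite | github.com/HCT116/rosalind | FIBD/FIBD.py | wabbits
-- ===== SOURCE A (Python) =====
-- def wabbits(mos,alivemos,L=None):
--     #gonna use a list of 3 tuples of gestating,newborn,reproducing numbers
--     if L is None:#first month
--         L=[]
--         gestating,newborn,reproducing = 0, 1, 0
--         L.append((gestating,newborn,reproducing))
--
--     else:
--         gestating,newborn,reproducing = L[-1][0], L[-1][1], L[-1][2]
--
--         if len(L) >= alivemos:#old ones who where newborn alivemos ago die
--             reproducing -= L[-alivemos][1]
--
--         reproducing += newborn#newborns mature to reproducing age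
--         newborn = gestating #babies are born into newborns
--         gestating = reproducing #reproducing act makes fetuses
--         L.append((gestating,newborn,reproducing))
--
--     if len(L) == mos:
--         return reproducing + newborn
--     return wabbits(mos,alivemos,L)
-- ===== SOURCE B (Python) =====
-- def wabbits(mos, alivemos, L=None):
--     # Iterative: three scalar counters plus the history of newborn counts,
--     # instead of A's recursion over a growing list of 3-tuples.
--     if L is None:
--         g, n, r = 0, 1, 0
--         born = [1]
--     else:
--         born = [t[1] for t in L]
--         g, n, r = L[-1]
--     k = len(born)
--     while k != mos:
--         if k >= alivemos:
--             r -= born[-alivemos]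
--         r += n
--         n, g = g, r
--         born.append(n)
--         k += 1
--     return r + n
-- ===== Notes on version B (the rewrite author's own statement) =====
-- stated objective: simpler
-- what changed: Replaces the recursion that rebuilds and threads a growing list of (gestating,newborn,reproducing) 3-tuples with a plain while loop over three scalar counters and a flat list of past newborn counts.
import Mathlib
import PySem

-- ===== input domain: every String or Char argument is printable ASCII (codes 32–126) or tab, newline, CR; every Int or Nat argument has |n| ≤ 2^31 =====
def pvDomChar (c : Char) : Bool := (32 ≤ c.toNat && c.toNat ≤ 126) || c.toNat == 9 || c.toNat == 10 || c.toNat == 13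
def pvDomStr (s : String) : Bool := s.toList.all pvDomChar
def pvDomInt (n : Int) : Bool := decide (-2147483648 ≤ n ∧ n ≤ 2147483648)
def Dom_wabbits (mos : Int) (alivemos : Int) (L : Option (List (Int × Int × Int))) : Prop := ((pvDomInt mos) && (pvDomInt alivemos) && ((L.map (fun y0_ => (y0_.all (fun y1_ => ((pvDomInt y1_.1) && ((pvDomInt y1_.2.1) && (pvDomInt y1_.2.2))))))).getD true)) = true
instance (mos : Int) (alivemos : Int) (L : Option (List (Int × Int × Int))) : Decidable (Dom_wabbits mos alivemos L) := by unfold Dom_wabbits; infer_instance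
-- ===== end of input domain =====

-- B replaces A's recursion over a growing list of 3-tuples by a while loop over
-- three scalar counters plus the flat list of newborn counts (objective: simpler).

-- ===== PORT A =====
-- One body of A's recursion: read the last 3-tuple, apply deaths/maturing/births,
-- yield the tuple A appends.  wabbitsGo is A's tail recursion; its fuel counts the
-- remaining recursive calls, under Pre_ exactly mos - len(L) - 1 (a totality
-- guard, not a new algorithm).
def wabbitsStep (alivemos : Int) (l : List (Int × Int × Int)) : Int × Int × Int :=
  let last := (PySem.List.pyGet? l (-1)).getD (0, 0, 0)
  let gestating := last.1
  let newborn := last.2.1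
  let reproducing := last.2.2
  let reproducing :=
    if alivemos ≤ (l.length : Int) then
      reproducing - ((PySem.List.pyGet? l (-alivemos)).getD (0, 0, 0)).2.1
    else reproducing
  let reproducing := reproducing + newborn
  let newborn' := gestating
  let gestating' := reproducing
  (gestating', newborn', reproducing)

def wabbitsGo (alivemos : Int) (l : List (Int × Int × Int)) : Nat → Int
  | 0 => (wabbitsStep alivemos l).2.2 + (wabbitsStep alivemos l).2.1
  | Nat.succ f => wabbitsGo alivemos (l ++ [wabbitsStep alivemos l]) f

def wabbits (mos : Int) (alivemos : Int) (L : Option (List (Int × Int × Int))) : Int :=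
  match L with
  | none =>
    let l : List (Int × Int × Int) := [(0, 1, 0)]
    if (l.length : Int) = mos then 0 + 1
    else wabbitsGo alivemos l (mos - (l.length : Int) - 1).toNat
  | some l =>
    wabbitsGo alivemos l (mos - (l.length : Int) - 1).toNat

-- ===== PORT B =====
-- The while loop of B; fuel = remaining iterations = mos - k under Pre_.
def wabbitsLoop (alivemos : Int) (born : List Int) (g n r : Int) : Nat → Int
  | 0 => r + n
  | Nat.succ f =>
    let r := if alivemos ≤ (born.length : Int) then
        r - (PySem.List.pyGet? born (-alivemos)).getD 0
      else r
    let r := r + n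
    let n' := g
    let g' := r
    wabbitsLoop alivemos (born ++ [n']) g' n' r f

def wabbits_alt (mos : Int) (alivemos : Int) (L : Option (List (Int × Int × Int))) : Int :=
  match L with
  | none => wabbitsLoop alivemos [1] 0 1 0 (mos - 1).toNat
  | some l =>
    let born := l.map (fun t => t.2.1)
    let last := (PySem.List.pyGet? l (-1)).getD (0, 0, 0)
    wabbitsLoop alivemos born last.1 last.2.1 last.2.2 (mos - (l.length : Int)).toNat

-- ===== PRECONDITION & SPEC =====
-- Pre_ excludes exactly the inputs where Python A raises: mos never reached by the
-- growing list (infinite recursion, RecursionError) and the IndexErrors of L[-1] on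
-- an empty list and of L[-alivemos] for negative alivemos.
def Pre_wabbits (mos : Int) (alivemos : Int) (L : Option (List (Int × Int × Int))) : Prop :=
  match L with
  | none => 1 ≤ mos ∧ (0 ≤ alivemos ∨ mos = 1)
  | some l => l ≠ [] ∧ (l.length : Int) < mos ∧ (0 ≤ alivemos ∨ -alivemos < (l.length : Int))
instance (mos : Int) (alivemos : Int) (L : Option (List (Int × Int × Int))) : Decidable (Pre_wabbits mos alivemos L) := by
  unfold Pre_wabbits; cases L <;> infer_instance

def pvWitness_wabbits : Int × Int × (Option (List (Int × Int × Int))) := (6, 3, none)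

def Spec_wabbits (mos : Int) (alivemos : Int) (L : Option (List (Int × Int × Int))) (out : Int) : Prop := out = wabbits_alt mos alivemos L
instance (mos : Int) (alivemos : Int) (L : Option (List (Int × Int × Int))) (out : Int) : Decidable (Spec_wabbits mos alivemos L out) := by unfold Spec_wabbits; infer_instance

-- ===== CLAIM (what is proved, stated in full; the proofs are below) =====
def Claim_equal_wabbits : Prop := ∀ (mos : Int) (alivemos : Int) (L : Option (List (Int × Int × Int))), Dom_wabbits mos alivemos L → Pre_wabbits mos alivemos L → Spec_wabbits mos alivemos L (wabbits mos alivemos L)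

-- ===== LEMMAS AND PROOFS =====

-- Proof-side abbreviations: the newborn column, the last tuple, B's updated r.
def pvSel (t : Int × Int × Int) : Int := t.2.1
def pvLast (l : List (Int × Int × Int)) : Int × Int × Int :=
  (PySem.List.pyGet? l (-1)).getD (0, 0, 0)
def pvStepRB (a : Int) (born : List Int) (n r : Int) : Int :=
  (if a ≤ (born.length : Int) then r - (PySem.List.pyGet? born (-a)).getD 0 else r) + n

theorem pyGet?_map_comm {α β : Type} (f : α → β) (xs : List α) (i : Int) :
    PySem.List.pyGet? (xs.map f) i = (PySem.List.pyGet? xs i).map f := by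
  by_cases h0 : 0 ≤ i
  · rw [PySem.List.pyGet?_of_nonneg _ h0, PySem.List.pyGet?_of_nonneg _ h0,
      List.getElem?_map]
  · by_cases hr : PySem.Raise.InRange xs.length i
    · have hk1 : 0 < (-i).toNat := by omega
      have hk2 : (-i).toNat ≤ xs.length := by
        unfold PySem.Raise.InRange at hr; omega
      have hi : i = -(((-i).toNat : Nat) : Int) := by omega
      rw [hi, PySem.List.pyGet?_neg_natCast _ _ hk1 (by simpa using hk2),
        PySem.List.pyGet?_neg_natCast _ _ hk1 hk2, List.length_map,
        List.getElem?_map]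
    · have hr' : ¬ PySem.Raise.InRange (xs.map f).length i := by simpa using hr
      rw [(PySem.List.pyGet?_eq_none_iff _ _).2 hr',
        (PySem.List.pyGet?_eq_none_iff _ _).2 hr]
      rfl

theorem getD_map_snd_fst (o : Option (Int × Int × Int)) :
    (o.map pvSel).getD 0 = (o.getD (0, 0, 0)).2.1 := by
  cases o <;> rfl

theorem go_zero (a : Int) (l : List (Int × Int × Int)) :
    wabbitsGo a l 0 = (wabbitsStep a l).2.2 + (wabbitsStep a l).2.1 := rfl

theorem go_succ (a : Int) (l : List (Int × Int × Int)) (f : Nat) :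
    wabbitsGo a l (f + 1) = wabbitsGo a (l ++ [wabbitsStep a l]) f := rfl

theorem loop_zero (a : Int) (born : List Int) (g n r : Int) :
    wabbitsLoop a born g n r 0 = r + n := rfl

theorem loop_succ (a : Int) (born : List Int) (g n r : Int) (f : Nat) :
    wabbitsLoop a born g n r (f + 1) =
      wabbitsLoop a (born ++ [g]) (pvStepRB a born n r) g (pvStepRB a born n r) f := rfl

theorem step_bridge (a : Int) (l : List (Int × Int × Int)) :
    wabbitsStep a l =
      (pvStepRB a (l.map pvSel) (pvLast l).2.1 (pvLast l).2.2, (pvLast l).1,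
        pvStepRB a (l.map pvSel) (pvLast l).2.1 (pvLast l).2.2) := by
  simp [wabbitsStep, pvStepRB, pvLast, pyGet?_map_comm, getD_map_snd_fst]

theorem last_append (l : List (Int × Int × Int)) (t : Int × Int × Int) :
    pvLast (l ++ [t]) = t := by
  simp [pvLast, PySem.List.pyGet?_neg_one_append_singleton]

-- Invariant: one step of A's recursion is one iteration of B's loop, when the loop
-- carries the newborn column of A's list and the components of its last tuple.
theorem go_eq_loop (fuel : Nat) (a : Int) (l : List (Int × Int × Int)) :
    wabbitsGo a l fuel =
      wabbitsLoop a (l.map pvSel) (pvLast l).1 (pvLast l).2.1 (pvLast l).2.2 (fuel + 1) := by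
  induction fuel generalizing l with
  | zero =>
    rw [go_zero, loop_succ, loop_zero, step_bridge]
  | succ f ih =>
    rw [go_succ, loop_succ, ih (l ++ [wabbitsStep a l]), last_append, step_bridge]
    simp [List.map_append, pvSel]

theorem wabbits_eq (mos alivemos : Int) (L : Option (List (Int × Int × Int)))
    (hpre : Pre_wabbits mos alivemos L) :
    wabbits mos alivemos L = wabbits_alt mos alivemos L := by
  cases L with
  | none =>
    obtain ⟨h1, -⟩ := hpre
    by_cases hm : mos = 1
    · subst hm; rfl
    · have hne : ¬ ((1 : Nat) : Int) = mos := by omega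
      have hfuel : (mos - 1).toNat = (mos - 1 - 1).toNat + 1 := by omega
      simp only [wabbits, wabbits_alt, List.length_cons, List.length_nil]
      rw [if_neg (by exact_mod_cast hne), hfuel, go_eq_loop]
      rfl
  | some l =>
    obtain ⟨-, hlen, -⟩ := hpre
    have hfuel : (mos - (l.length : Int)).toNat = (mos - (l.length : Int) - 1).toNat + 1 := by
      omega
    simp only [wabbits, wabbits_alt]
    rw [hfuel, go_eq_loop]
    rfl

-- ===== VERDICT (by name: the statement is the Claim_ definition above) =====
theorem wabbits_spec : Claim_equal_wabbits := by
  intro mos alivemos L _ hpre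
  unfold Spec_wabbits
  exact wabbits_eq mos alivemos L hpre
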